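-- pv_equiv track=rewrite | github.com/congdm/xpu-train-scripts | prepare_dataset.py | _tags_consolidation
-- ===== SOURCE A (Python) =====
-- def _tags_consolidation(tags):
--     res = []
--     for i in range(len(tags)):
--         j = 0
--         eliminated = False
--         while not eliminated and j < len(tags):
--             eliminated = i != j and tags[i] in tags[j]
--             j += 1
--         if not eliminated:
--             res.append(tags[i])
--     return res
-- ===== SOURCE B (Python) =====
-- def _tags_consolidation(tags):
--     # Build a substring index once: for each substring value, count how many tags
--     # (occurrences) contain it.  A tag survives iff exactly one tag -- itself --
--     # contains it: "eliminated by some other position" is the same as "contained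
--     # in >= 2 tags", since every tag contains itself.
--     occ = {}
--     for u in tags:
--         subs = set()
--         for a in range(len(u) + 1):
--             for b in range(a, len(u) + 1):
--                 subs.add(u[a:b])
--         for s in subs:
--             occ[s] = occ.get(s, 0) + 1
--     return [t for t in tags if occ.get(t, 0) == 1]
-- ===== Notes on version B (the rewrite author's own statement) =====
-- stated objective: faster
-- what changed: A runs an early-exit pairwise scan (for each i, a while over all j testing tags[i] in tags[j]); B instead builds a substring-occurrence index once (for each tag, the set of its substrings counted into a hash map) and keeps a tag iff its total containment count is exactly 1, i.e. only the tag itself contains it -- the quadratic-in-n inner scan disappears in favour of one O(1) lookup per tag.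
import Mathlib
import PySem

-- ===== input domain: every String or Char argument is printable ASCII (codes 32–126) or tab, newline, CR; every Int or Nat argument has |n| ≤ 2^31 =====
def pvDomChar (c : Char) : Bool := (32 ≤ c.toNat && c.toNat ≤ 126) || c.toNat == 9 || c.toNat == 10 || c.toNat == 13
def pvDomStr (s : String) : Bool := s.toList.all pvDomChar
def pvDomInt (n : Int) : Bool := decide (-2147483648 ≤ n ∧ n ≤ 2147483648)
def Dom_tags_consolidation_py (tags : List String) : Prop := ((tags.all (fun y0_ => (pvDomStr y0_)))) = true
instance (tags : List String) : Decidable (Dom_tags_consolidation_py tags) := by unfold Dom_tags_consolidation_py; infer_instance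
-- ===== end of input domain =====

-- B replaces A's early-exit pairwise scan by a substring-occurrence index built once
-- (each tag contributes the set of its substrings to a counter); a tag survives iff
-- exactly one tag — itself — contains it. Objective: alternative algorithm, same result.

-- ===== PORT A =====
-- A's inner while loop: scan j upward until eliminated or j = len(tags)
def pvAElim (tags : List String) (ti : String) (i : Int) (j : Nat) : Bool :=
  if j < tags.length then
    if decide (i ≠ (j : Int)) && PySem.Str.isIn ti (tags.getD j "") then true
    else pvAElim tags ti i (j + 1)
  else false
termination_by tags.length - j

def tags_consolidation_py (tags : List String) : List String :=
  (PySem.List.pyRange 0 (tags.length) 1).foldl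
    (fun res i =>
      if ! pvAElim tags (PySem.List.pyGetD tags i "") i 0 then
        res ++ [PySem.List.pyGetD tags i ""]
      else res)
    []

-- ===== PORT B =====
-- the set 'subs' of Source B: all substrings u[a:b], 0 <= a <= b <= len(u)
def pvSubs (u : String) : PySem.Set String :=
  (PySem.List.pyRange 0 ((PySem.Str.len u : Int) + 1) 1).foldl
    (fun subs a =>
      (PySem.List.pyRange a ((PySem.Str.len u : Int) + 1) 1).foldl
        (fun subs b => PySem.Set.add subs (PySem.Str.slice u (some a) (some b)))
        subs)
    PySem.Set.empty

-- occ[s] in Source B is occ.get(s, 0) + 1, ported as getD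
def tags_consolidation_py_alt (tags : List String) : List String :=
  let occ : PySem.Dict String Int :=
    tags.foldl
      (fun occ u => (pvSubs u).foldl (fun d s => d.insert s (d.getD s 0 + 1)) occ)
      PySem.Dict.empty
  tags.filter (fun t => occ.getD t 0 == 1)

-- ===== PRECONDITION & SPEC =====
def Spec_tags_consolidation_py (tags : List String) (out : List String) : Prop := out = tags_consolidation_py_alt tags
instance (tags : List String) (out : List String) : Decidable (Spec_tags_consolidation_py tags out) := by unfold Spec_tags_consolidation_py; infer_instance

-- ===== CLAIM (what is proved, stated in full; the proofs are below) =====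
def Claim_equal_tags_consolidation_py : Prop := ∀ (tags : List String), Dom_tags_consolidation_py tags → Spec_tags_consolidation_py tags (tags_consolidation_py tags)

-- ===== LEMMAS AND PROOFS =====

-- A's while loop finds whether some index ≥ j eliminates tags[i]
theorem pvAElim_iff (tags : List String) (ti : String) (i : Int) :
    ∀ j, pvAElim tags ti i j = true ↔
      ∃ k, j ≤ k ∧ k < tags.length ∧ i ≠ (k : Int) ∧
        PySem.Str.isIn ti (tags.getD k "") = true := by
  have key : ∀ (fuel j : Nat), tags.length - j ≤ fuel →
      (pvAElim tags ti i j = true ↔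
        ∃ k, j ≤ k ∧ k < tags.length ∧ i ≠ (k : Int) ∧
          PySem.Str.isIn ti (tags.getD k "") = true) := by
    intro fuel
    induction fuel with
    | zero =>
      intro j hfuel
      have hj : ¬ j < tags.length := by omega
      unfold pvAElim
      simp only [hj, if_false]
      constructor
      · intro hfalse; exact absurd hfalse (by simp)
      · rintro ⟨k, hk1, hk2, -, -⟩; omega
    | succ n ihf =>
      intro j hfuel
      unfold pvAElim
      by_cases hj : j < tags.length
      · simp only [hj, if_true]
        cases hc : (decide (i ≠ (j : Int)) && PySem.Str.isIn ti (tags.getD j "")) with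
        | true =>
          simp only [if_true]
          constructor
          · intro _
            simp only [Bool.and_eq_true, decide_eq_true_eq] at hc
            exact ⟨j, Nat.le_refl _, hj, hc.1, hc.2⟩
          · intro _; trivial
        | false =>
          simp only [Bool.false_eq_true, if_false]
          rw [ihf (j + 1) (by omega)]
          constructor
          · rintro ⟨k, hk1, hk2, hk3, hk4⟩
            exact ⟨k, by omega, hk2, hk3, hk4⟩
          · rintro ⟨k, hk1, hk2, hk3, hk4⟩
            refine ⟨k, ?_, hk2, hk3, hk4⟩
            rcases Nat.lt_or_ge j k with h' | h'
            · omega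
            · exfalso
              have hkj : k = j := by omega
              subst hkj
              rcases Bool.and_eq_false_iff.mp hc with h1 | h2
              · exact hk3 (by simpa using h1)
              · simp at h2; simp [h2] at hk4
      · simp only [hj, if_false]
        constructor
        · intro hfalse; exact absurd hfalse (by simp)
        · rintro ⟨k, hk1, hk2, -, -⟩; omega
  intro j
  exact key (tags.length - j) j (Nat.le_refl _)

-- an index-filtered map over range equals a value filter on the list
theorem pvFilterIdx {α : Type} (xs : List α) (d : α) (q : α → Bool) :
    ∀ (s : Nat) (tail : List α), tail = xs.drop s →
      ((List.range' s tail.length).filter (fun k => q (xs.getD k d))).map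
          (fun k => xs.getD k d) = tail.filter q := by
  intro s tail
  induction tail generalizing s with
  | nil => intro _; simp
  | cons a tl ih =>
    intro h
    have hsome : xs[s]? = some a := by
      have h0 : (xs.drop s)[0]? = some a := by rw [← h]; rfl
      simpa using h0
    have hxa : xs.getD s d = a := by
      rw [List.getD_eq_getElem?_getD, hsome]; rfl
    have htl : tl = xs.drop (s + 1) := by
      rw [← List.tail_drop, ← h]; rfl
    have ih' := ih (s + 1) htl
    simp only [List.getD_eq_getElem?_getD] at ih'
    rw [List.length_cons, List.range'_succ, List.filter_cons, List.filter_cons, hxa]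
    cases hq : q a with
    | true => simp [hsome, ih']
    | false => simp [ih']

-- membership through a fold of Set.add-like steps
theorem pvMemFoldl {β : Type} (P : β → String → Prop)
    (step : PySem.Set String → β → PySem.Set String)
    (h : ∀ s a x, x ∈ step s a ↔ x ∈ s ∨ P a x) :
    ∀ (l : List β) (init : PySem.Set String) (x : String),
      x ∈ l.foldl step init ↔ x ∈ init ∨ ∃ a ∈ l, P a x := by
  intro l
  induction l with
  | nil => intro init x; simp
  | cons a tl ih =>
    intro init x
    rw [List.foldl_cons, ih, h]
    constructor
    · rintro (⟨hx | hp⟩ | ⟨b, hb, hp⟩)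
      · exact Or.inl hx
      · exact Or.inr ⟨a, by simp, hp⟩
      · exact Or.inr ⟨b, by simp [hb], hp⟩
    · rintro (hx | ⟨b, hb, hp⟩)
      · exact Or.inl (Or.inl hx)
      · rcases List.mem_cons.mp hb with rfl | hb'
        · exact Or.inl (Or.inr hp)
        · exact Or.inr ⟨b, hb', hp⟩

-- infixes of a list are exactly the drop/take windows
theorem pvInfix_iff (x u : List Char) :
    x <:+: u ↔ ∃ a : Nat, a ≤ u.length ∧ ∃ b : Nat, a ≤ b ∧ b ≤ u.length ∧
      x = (u.drop a).take (b - a) := by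
  constructor
  · rintro ⟨p, t, rfl⟩
    refine ⟨p.length, by simp, p.length + x.length, by omega, by simp, ?_⟩
    rw [List.append_assoc, List.drop_left]
    simp
  · rintro ⟨a, -, b, -, -, rfl⟩
    exact ((List.take_prefix _ _).isInfix).trans (List.drop_suffix a u).isInfix

-- a set stays duplicate-free through a fold whose step preserves Nodup
theorem pvNodupFoldl {β : Type} (step : PySem.Set String → β → PySem.Set String)
    (h : ∀ s a, s.Nodup → (step s a).Nodup) :
    ∀ (l : List β) (init : PySem.Set String), init.Nodup → (l.foldl step init).Nodup := by
  intro l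
  induction l with
  | nil => intro init hi; exact hi
  | cons a tl ih => intro init hi; exact ih _ (h _ _ hi)

-- pvSubs u holds exactly the substrings of u
theorem pvMem_subs (u x : String) :
    x ∈ pvSubs u ↔ PySem.Str.isIn x u = true := by
  have hinner : ∀ (a : Int) (init : PySem.Set String) (y : String),
      y ∈ (PySem.List.pyRange a ((PySem.Str.len u : Int) + 1) 1).foldl
            (fun subs b => PySem.Set.add subs (PySem.Str.slice u (some a) (some b))) init
        ↔ y ∈ init ∨ ∃ b ∈ PySem.List.pyRange a ((PySem.Str.len u : Int) + 1) 1,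
            y = PySem.Str.slice u (some a) (some b) := by
    intro a init y
    exact pvMemFoldl (fun b y => y = PySem.Str.slice u (some a) (some b)) _
      (fun s b y => PySem.Set.mem_add s _ y) _ init y
  have hmem : x ∈ pvSubs u ↔
      ∃ a ∈ PySem.List.pyRange 0 ((PySem.Str.len u : Int) + 1) 1,
        ∃ b ∈ PySem.List.pyRange a ((PySem.Str.len u : Int) + 1) 1,
          x = PySem.Str.slice u (some a) (some b) := by
    unfold pvSubs
    rw [pvMemFoldl _ _ (fun s a y => hinner a s y)]
    constructor
    · rintro (hemp | h)
      · exact absurd hemp (by simp [PySem.Set.empty])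
      · exact h
    · exact fun h => Or.inr h
  have hL : (PySem.Str.len u : Int) = (u.toList.length : Int) := by simp
  rw [hmem, PySem.Str.isIn_iff_infix, pvInfix_iff]
  constructor
  · rintro ⟨a, hamem, b, hbmem, rfl⟩
    rcases PySem.List.mem_pyRange_one.mp hamem with ⟨ha0, haU⟩
    rcases PySem.List.mem_pyRange_one.mp hbmem with ⟨hab, hbU⟩
    refine ⟨a.toNat, by omega, b.toNat, by omega, by omega, ?_⟩
    have hsl : (PySem.Str.slice u (some a) (some b)).toList
        = PySem.List.slice u.toList (some a) (some b) := by simp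
    rw [hsl, PySem.List.slice_toNat u.toList ha0 (le_trans ha0 hab)]
  · rintro ⟨aN, haN, bN, habN, hbN, hx⟩
    refine ⟨(aN : Int), PySem.List.mem_pyRange_one.mpr (by omega),
      (bN : Int), PySem.List.mem_pyRange_one.mpr (by omega), ?_⟩
    apply String.toList_injective
    rw [hx]
    have hsl : (PySem.Str.slice u (some (aN : Int)) (some (bN : Int))).toList
        = PySem.List.slice u.toList (some (aN : Int)) (some (bN : Int)) := by simp
    rw [hsl, PySem.List.slice_natCast]

theorem pvNodup_subs (u : String) : (pvSubs u).Nodup := by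
  unfold pvSubs
  exact pvNodupFoldl _
    (fun s a hs => pvNodupFoldl _ (fun s2 b hs2 => PySem.Set.nodup_add s2 _ hs2) _ s hs)
    _ _ (List.nodup_nil)

-- the counting loop adds list-count to every key
theorem pvGetD_inc (l : List String) (t : String) :
    ∀ d : PySem.Dict String Int,
      (l.foldl (fun d s => d.insert s (d.getD s 0 + 1)) d).getD t 0
        = d.getD t 0 + l.count t := by
  induction l with
  | nil => intro d; simp
  | cons s tl ih =>
    intro d
    rw [List.foldl_cons, ih, PySem.Dict.getD_insert]
    by_cases h : t = s
    · subst h; rw [List.count_cons_self]; simp; ring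
    · rw [List.count_cons_of_ne (by intro e; exact h e.symm)]; simp [h]

-- B's index counts, for each tag value, how many tags contain it
theorem pvOcc (tags : List String) (t : String) :
    (tags.foldl
        (fun occ u => (pvSubs u).foldl (fun d s => d.insert s (d.getD s 0 + 1)) occ)
        PySem.Dict.empty).getD t 0
      = (tags.countP (fun u => PySem.Str.isIn t u) : Int) := by
  have key : ∀ (l : List String) (d : PySem.Dict String Int),
      (l.foldl
          (fun occ u => (pvSubs u).foldl (fun d s => d.insert s (d.getD s 0 + 1)) occ)
          d).getD t 0
        = d.getD t 0 + (l.countP (fun u => PySem.Str.isIn t u) : Int) := by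
    intro l
    induction l with
    | nil => intro d; simp
    | cons u tl ih =>
      intro d
      rw [List.foldl_cons, ih, pvGetD_inc]
      have hcnt : (pvSubs u).count t = if PySem.Str.isIn t u = true then 1 else 0 := by
        by_cases hm : t ∈ pvSubs u
        · rw [List.count_eq_one_of_mem (pvNodup_subs u) hm,
            if_pos ((pvMem_subs u t).mp hm)]
        · rw [List.count_eq_zero_of_not_mem hm,
            if_neg (fun h => hm ((pvMem_subs u t).mpr h))]
      rw [hcnt, List.countP_cons]
      push_cast
      split_ifs <;> ring
  rw [key tags PySem.Dict.empty]
  simp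

-- the key pointwise fact: A's per-index verdict equals B's per-value verdict
theorem pvPred_eq (tags : List String) (k : Nat) (hk : k < tags.length) :
    (! pvAElim tags (tags.getD k "") (k : Int) 0) =
      ((tags.countP (fun u => PySem.Str.isIn (tags.getD k "") u) : Int) == 1) := by
  have hgetk : tags.getD k "" = tags[k] := by
    rw [List.getD_eq_getElem?_getD, List.getElem?_eq_getElem hk]; rfl
  set t := tags.getD k "" with ht
  set q : Nat → Bool := fun j => PySem.Str.isIn t (tags.getD j "") with hq
  have hqk : q k = true := by
    show PySem.Str.isIn t (tags.getD k "") = true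
    rw [← ht, PySem.Str.isIn_iff_infix]
  set S : List Nat := (List.range tags.length).filter q with hS
  have hSnodup : S.Nodup := List.Nodup.filter _ List.nodup_range
  have hkS : k ∈ S := List.mem_filter.mpr ⟨List.mem_range.mpr hk, hqk⟩
  have hcount : tags.countP (fun u => PySem.Str.isIn t u) = S.length := by
    have hfi := pvFilterIdx tags "" (fun u => PySem.Str.isIn t u) 0 tags rfl
    rw [List.countP_eq_length_filter, ← hfi, List.length_map, hS, List.range_eq_range']
  rw [Bool.eq_iff_iff, Bool.not_eq_true', ← Bool.not_eq_true, pvAElim_iff]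
  have hcast : ((tags.countP (fun u => PySem.Str.isIn t u) : Int) == 1)
      ↔ tags.countP (fun u => PySem.Str.isIn t u) = 1 := by
    simp only [beq_iff_eq]; exact_mod_cast Iff.rfl
  rw [hcast, hcount]
  constructor
  · intro hno
    have hall : ∀ j ∈ S, j = k := by
      intro j hjS
      rcases List.mem_filter.mp hjS with ⟨hjr, hqj⟩
      by_contra hne
      refine hno ⟨j, Nat.zero_le _, List.mem_range.mp hjr, ?_, hqj⟩
      intro e
      have hekj : k = j := by exact_mod_cast e
      exact hne hekj.symm
    cases hSc : S with
    | nil => rw [hSc] at hkS; cases hkS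
    | cons a rest =>
      have ha : a = k := hall a (by rw [hSc]; simp)
      have hrest : rest = [] := by
        cases hrc : rest with
        | nil => rfl
        | cons b r2 =>
          have hb : b = k := hall b (by rw [hSc, hrc]; simp)
          have := hSnodup
          rw [hSc, hrc, ha, hb] at this
          simp at this
      simp [hrest]
  · intro h1
    rintro ⟨j, -, hj, hne, hin⟩
    obtain ⟨a, hSa⟩ := List.length_eq_one_iff.mp h1
    have hak : a = k := by
      have h' := hkS
      rw [hSa] at h'
      have hka : k = a := by simpa using h'
      exact hka.symm
    have hjS : j ∈ S := List.mem_filter.mpr ⟨List.mem_range.mpr hj, hin⟩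
    rw [hSa, hak] at hjS
    have hjk : j = k := by simpa using hjS
    exact hne (by rw [hjk])

-- ===== VERDICT (by name: the statement is the Claim_ definition above) =====
theorem tags_consolidation_py_spec : Claim_equal_tags_consolidation_py := by
  intro tags _
  unfold Spec_tags_consolidation_py
  simp only [tags_consolidation_py, tags_consolidation_py_alt]
  rw [PySem.List.pyRange_one]
  simp only [Int.sub_zero, Int.toNat_natCast, List.foldl_map, Int.zero_add,
    PySem.List.pyGetD_natCast]
  rw [PySem.List.foldl_append_if]
  rw [List.filter_congr (q := fun k =>
      ((tags.countP (fun u => PySem.Str.isIn (tags.getD k "") u) : Int) == 1))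
    (by intro k hk; exact pvPred_eq tags k (by simpa using hk))]
  rw [List.filter_congr (q := fun t =>
      ((tags.countP (fun u => PySem.Str.isIn t u) : Int) == 1))
    (by intro t ht; rw [pvOcc])]
  simpa [List.range_eq_range'] using
    pvFilterIdx tags "" (fun t => ((tags.countP (fun u => PySem.Str.isIn t u) : Int) == 1))
      0 tags rfl
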